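-- pv_equiv track=rewrite | github.com/IvanHanloth/Verhub | sdk/python/verhub_sdk/client.py | _extract_placeholders
-- ===== SOURCE A (Python) =====
-- def _extract_placeholders(path_template: str) -> list[str]:
--     """
--     :param path_template: 路径模板
--     :return: 占位符列表
--     """
--     placeholders: list[str] = []
--     start = 0
--     while True:
--         left = path_template.find("{", start)
--         if left < 0:
--             break
--         right = path_template.find("}", left)
--         if right < 0:
--             break
--         placeholders.append(path_template[left + 1 : right])
--         start = right + 1
--
--     return placeholders
-- ===== SOURCE B (Python) =====
-- def _extract_placeholders(path_template: str) -> list[str]: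
--     placeholders: list[str] = []
--     buf = None  # None = outside braces; list of chars = inside, collecting
--     for ch in path_template:
--         if buf is None:
--             if ch == "{":
--                 buf = []
--         elif ch == "}":
--             placeholders.append("".join(buf))
--             buf = None
--         else:
--             buf.append(ch)
--     return placeholders
-- ===== Notes on version B (the rewrite author's own statement) =====
-- stated objective: alternative
-- what changed: Replaced the while-loop of repeated str.find calls plus slicing with a single forward character-by-character scan that keeps an optional in-brace buffer and emits the buffer when the closing brace is reached.
import Mathlib
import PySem

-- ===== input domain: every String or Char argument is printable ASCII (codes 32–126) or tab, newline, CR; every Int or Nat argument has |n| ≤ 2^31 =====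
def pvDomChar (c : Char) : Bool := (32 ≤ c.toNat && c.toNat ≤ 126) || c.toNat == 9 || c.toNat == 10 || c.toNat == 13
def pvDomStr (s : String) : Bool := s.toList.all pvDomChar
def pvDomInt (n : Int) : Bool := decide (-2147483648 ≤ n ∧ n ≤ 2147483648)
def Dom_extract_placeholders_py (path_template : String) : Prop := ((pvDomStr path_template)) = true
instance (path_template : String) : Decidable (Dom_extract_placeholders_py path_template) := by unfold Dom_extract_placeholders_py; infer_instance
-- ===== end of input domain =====

-- B replaces A's repeated str.find + slice while-loop by a single forward character scan
-- with an optional in-brace buffer (objective: alternative; same O(n) cost).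

-- ===== PORT A =====
-- A's while-loop: fuel (length+1) only makes the unchanged computation total;
-- each iteration moves `start` past the found '}', so it always suffices.
def extractA_loop (s : List Char) : Nat → Int → List String → List String
  | 0, _, acc => acc
  | fuel + 1, start, acc =>
    let left := PySem.Chars.findFrom s ['{'] start
    if left < 0 then acc
    else
      let right := PySem.Chars.findFrom s ['}'] left
      if right < 0 then acc
      else extractA_loop s fuel (right + 1)
            (acc ++ [String.mk (PySem.Chars.slice s (some (left + 1)) (some right))])

def extract_placeholders_py (path_template : String) : List String :=
  extractA_loop path_template.toList (path_template.toList.length + 1) 0 []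

-- ===== PORT B =====
-- Source B's loop: state is `none` (outside braces) or `some buf` (chars collected since '{').
def extractB_loop : List Char → Option (List Char) → List String
  | [], _ => []
  | c :: rest, none => if c = '{' then extractB_loop rest (some []) else extractB_loop rest none
  | c :: rest, some buf =>
    if c = '}' then String.mk buf :: extractB_loop rest none
    else extractB_loop rest (some (buf ++ [c]))

def extract_placeholders_py_alt (path_template : String) : List String :=
  extractB_loop path_template.toList none

-- ===== PRECONDITION & SPEC =====
def Spec_extract_placeholders_py (path_template : String) (out : List String) : Prop := out = extract_placeholders_py_alt path_template
instance (path_template : String) (out : List String) : Decidable (Spec_extract_placeholders_py path_template out) := by unfold Spec_extract_placeholders_py; infer_instance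

-- ===== CLAIM (what is proved, stated in full; the proofs are below) =====
def Claim_equal_extract_placeholders_py : Prop := ∀ (path_template : String), Dom_extract_placeholders_py path_template → Spec_extract_placeholders_py path_template (extract_placeholders_py path_template)

-- ===== LEMMAS AND PROOFS =====

theorem singleton_prefix_iff {a : Char} {t : List Char} :
    [a] <+: t ↔ ∃ u, t = a :: u := by
  cases t with
  | nil => simp
  | cons c rest =>
    constructor
    · intro h
      rcases h with ⟨q, hq⟩
      simp at hq
      exact ⟨rest, by simp [hq.1]⟩
    · rintro ⟨u, hu⟩
      rw [hu]
      exact ⟨u, by simp⟩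

theorem singleton_infix_cons {a c : Char} {t : List Char} (h : [a] <:+: t) :
    [a] <:+: (c :: t) := List.infix_cons h

theorem skipB (i : Nat) : ∀ (t : List Char),
    (∀ m, m < i → ¬ ([ '{' ] <+: t.drop m)) →
    extractB_loop t none = extractB_loop (t.drop i) none := by
  induction i with
  | zero => intro t _; simp
  | succ i ih =>
    intro t h
    cases t with
    | nil => simp
    | cons c rest =>
      have hc : c ≠ '{' := by
        intro hc
        exact h 0 (by omega) (by simp [hc])
      rw [show extractB_loop (c :: rest) none = extractB_loop rest none by
        simp [extractB_loop, hc]]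
      rw [ih rest (fun m hm => by
        have := h (m + 1) (by omega)
        simpa using this)]
      simp

theorem noOpenB : ∀ (t : List Char), ¬ ([ '{' ] <:+: t) → extractB_loop t none = [] := by
  intro t
  induction t with
  | nil => intro _; rfl
  | cons c rest ih =>
    intro h
    have hc : c ≠ '{' := by
      intro hc
      exact h ⟨[], rest, by simp [hc]⟩
    rw [show extractB_loop (c :: rest) none = extractB_loop rest none by
      simp [extractB_loop, hc]]
    exact ih (fun hi => h (singleton_infix_cons hi))

theorem noCloseB : ∀ (u : List Char) (buf : List Char),
    ¬ ([ '}' ] <:+: u) → extractB_loop u (some buf) = [] := by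
  intro u
  induction u with
  | nil => intro _ _; rfl
  | cons c rest ih =>
    intro buf h
    have hc : c ≠ '}' := by
      intro hc
      exact h ⟨[], rest, by simp [hc]⟩
    rw [show extractB_loop (c :: rest) (some buf) = extractB_loop rest (some (buf ++ [c])) by
      simp [extractB_loop, hc]]
    exact ih _ (fun hi => h (singleton_infix_cons hi))

theorem emitB (m : Nat) : ∀ (u buf : List Char),
    (∀ m', m' < m → ¬ ([ '}' ] <+: u.drop m')) →
    ([ '}' ] <+: u.drop m) →
    extractB_loop u (some buf)
      = String.mk (buf ++ u.take m) :: extractB_loop (u.drop (m + 1)) none := by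
  induction m with
  | zero =>
    intro u buf _ hm
    rcases singleton_prefix_iff.mp (by simpa using hm) with ⟨v, hv⟩
    subst hv
    simp [extractB_loop]
  | succ m ih =>
    intro u buf h hm
    cases u with
    | nil => simp at hm
    | cons c rest =>
      have hc : c ≠ '}' := by
        intro hc
        exact h 0 (by omega) (by simp [hc])
      rw [show extractB_loop (c :: rest) (some buf) = extractB_loop rest (some (buf ++ [c])) by
        simp [extractB_loop, hc]]
      rw [ih rest (buf ++ [c])
        (fun m' hm' => by have := h (m' + 1) (by omega); simpa using this)
        (by simpa using hm)]
      simp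

theorem mainAB (n : Nat) : ∀ (L : List Char) (k : Nat) (acc : List String),
    k ≤ L.length → L.length - k < n →
    extractA_loop L n (k : Int) acc = acc ++ extractB_loop (L.drop k) none := by
  induction n with
  | zero => intro L k acc hk hn; omega
  | succ n ih =>
    intro L k acc hk hn
    rw [extractA_loop]
    rw [PySem.Chars.findFrom_natCast L ['{'] k hk]
    by_cases hf : PySem.Chars.find (L.drop k) ['{'] = -1
    · -- no '{' ahead: A stops; B scans to the end emitting nothing
      rw [if_pos hf, if_pos (by norm_num)]
      rw [noOpenB _ ((PySem.Chars.find_eq_neg_one_iff _ _).mp hf)]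
      simp
    · -- '{' found, first at offset i of L.drop k
      rw [if_neg hf]
      have hf0 : 0 ≤ PySem.Chars.find (L.drop k) ['{'] :=
        (PySem.Chars.find_nonneg_iff _ _).mpr ((PySem.Chars.find_ne_neg_one_iff _ _).mp hf)
      obtain ⟨hpre, hmin⟩ := PySem.Chars.find_spec (s := L.drop k) (sub := ['{']) hf0
      have hfi : PySem.Chars.find (L.drop k) ['{']
          = ((PySem.Chars.find (L.drop k) ['{']).toNat : Int) :=
        (Int.toNat_of_nonneg hf0).symm
      revert hpre hmin
      generalize hi : (PySem.Chars.find (L.drop k) ['{']).toNat = i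
      intro hpre hmin
      rw [List.drop_drop] at hpre
      rcases singleton_prefix_iff.mp hpre with ⟨u, hu⟩
      have hik : k + i < L.length := by
        have hne : L.drop (k + i) ≠ [] := by rw [hu]; simp
        by_contra hcon
        exact hne (List.drop_eq_nil_of_le (by omega))
      rw [hfi, hi]
      rw [if_neg (by omega : ¬ ((k : Int) + (i : Int) < 0))]
      rw [show (k : Int) + (i : Int) = ((k + i : Nat) : Int) by push_cast; ring]
      rw [PySem.Chars.findFrom_natCast L ['}'] (k + i) (by omega)]
      rw [hu]
      by_cases hg : PySem.Chars.find ('{' :: u) ['}'] = -1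
      · -- no '}' after that '{': A stops; B opens the brace and never closes it
        rw [if_pos hg, if_pos (by norm_num)]
        rw [skipB i (L.drop k) (fun m hm => hmin m hm), List.drop_drop, hu]
        rw [show extractB_loop ('{' :: u) none = extractB_loop u (some []) by
          simp [extractB_loop]]
        rw [noCloseB u [] (fun hi2 => ((PySem.Chars.find_eq_neg_one_iff _ _).mp hg)
          (singleton_infix_cons hi2))]
        simp
      · -- '}' found, first at offset j of '{' :: u; j = m + 1 with the '}' at u.drop m
        rw [if_neg hg]
        have hg0 : 0 ≤ PySem.Chars.find ('{' :: u) ['}'] :=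
          (PySem.Chars.find_nonneg_iff _ _).mpr ((PySem.Chars.find_ne_neg_one_iff _ _).mp hg)
        obtain ⟨hpre2, hmin2⟩ := PySem.Chars.find_spec (s := '{' :: u) (sub := ['}']) hg0
        have hgj : PySem.Chars.find ('{' :: u) ['}']
            = ((PySem.Chars.find ('{' :: u) ['}']).toNat : Int) :=
          (Int.toNat_of_nonneg hg0).symm
        revert hpre2 hmin2
        generalize hj : (PySem.Chars.find ('{' :: u) ['}']).toNat = j
        intro hpre2 hmin2
        have hj0 : j ≠ 0 := by
          intro h0
          rw [h0] at hpre2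
          have hp : ['}'] <+: ('{' :: u) := by simpa using hpre2
          rcases singleton_prefix_iff.mp hp with ⟨v, hv⟩
          injection hv with h1 _
          exact absurd h1 (by decide)
        obtain ⟨m, hm⟩ : ∃ m, j = m + 1 := ⟨j - 1, by omega⟩
        subst hm
        have hprem : [ '}' ] <+: u.drop m := by simpa using hpre2
        have hjlen : m + 1 < ('{' :: u).length := by
          have hne : ('{' :: u).drop (m + 1) ≠ [] := by
            intro hcon
            rw [hcon] at hpre2
            simp at hpre2
          by_contra hcon
          exact hne (List.drop_eq_nil_of_le (by omega))
        rw [hgj, hj]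
        rw [if_neg (by omega : ¬ (((k + i : Nat) : Int) + ((m + 1 : Nat) : Int) < 0))]
        have hdrop1 : L.drop (k + i + 1) = u := by
          have h1 : ('{' :: u).drop 1 = u := rfl
          rw [← h1, ← hu, List.drop_drop]
        have hslice : PySem.Chars.slice L (some (((k + i : Nat) : Int) + 1))
            (some (((k + i : Nat) : Int) + ((m + 1 : Nat) : Int))) = u.take m := by
          rw [show ((k + i : Nat) : Int) + 1 = ((k + i + 1 : Nat) : Int) by push_cast; ring]
          rw [show ((k + i : Nat) : Int) + ((m + 1 : Nat) : Int)
              = ((k + i + m + 1 : Nat) : Int) by push_cast; ring]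
          rw [PySem.Chars.slice_eq_listSlice, PySem.List.slice_natCast, hdrop1]
          congr 1
          omega
        rw [hslice]
        rw [show ((k + i : Nat) : Int) + ((m + 1 : Nat) : Int) + 1
            = ((k + i + m + 2 : Nat) : Int) by push_cast; ring]
        have hulen : L.length - (k + i) = u.length + 1 := by
          have h2 := congrArg List.length hu
          simpa using h2
        have hlen2 : k + i + m + 2 ≤ L.length := by
          simp at hjlen
          omega
        rw [ih L (k + i + m + 2) _ hlen2 (by omega)]
        rw [skipB i (L.drop k) (fun m' hm' => hmin m' hm'), List.drop_drop, hu]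
        rw [show extractB_loop ('{' :: u) none = extractB_loop u (some []) by
          simp [extractB_loop]]
        rw [emitB m u []
          (fun m' hm' => by
            have := hmin2 (m' + 1) (by omega)
            simpa using this)
          hprem]
        have hdropfin : L.drop (k + i + m + 2) = u.drop (m + 1) := by
          rw [← hdrop1, List.drop_drop]
          congr 1
          omega
        rw [hdropfin]
        simp

-- ===== VERDICT (by name: the statement is the Claim_ definition above) =====
theorem extract_placeholders_py_spec : Claim_equal_extract_placeholders_py := by
  intro s _
  unfold Spec_extract_placeholders_py extract_placeholders_py extract_placeholders_py_alt
  rw [show (0 : Int) = ((0 : Nat) : Int) from rfl]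
  rw [mainAB (s.toList.length + 1) s.toList 0 [] (by omega) (by omega)]
  simp
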